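-- pv_equiv track=rewrite | github.com/ChrisHayduk/minAlphaFold2 | scripts/preprocess_openproteinset.py | alignment_pairs_with_offsets
-- ===== SOURCE A (Python) =====
-- from typing import Iterable, List, Sequence, Tuple
--
-- def alignment_pairs_with_offsets(
--     query_start: int,
--     query_aligned: str,
--     template_start: int,
--     template_aligned: str,
-- ) -> List[Tuple[int, int]]:
--     if len(query_aligned) != len(template_aligned):
--         raise ValueError("Aligned query and template strings must have the same length.")
--
--     pairs: List[Tuple[int, int]] = []
--     query_index = query_start - 1
--     template_index = template_start - 1
--     for query_char, template_char in zip(query_aligned, template_aligned):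
--         query_has = query_char != "-"
--         template_has = template_char != "-"
--         if query_has and template_has:
--             pairs.append((query_index, template_index))
--         if query_has:
--             query_index += 1
--         if template_has:
--             template_index += 1
--     return pairs
-- ===== SOURCE B (Python) =====
-- def alignment_pairs_with_offsets(query_start, query_aligned, template_start, template_aligned):
--     if len(query_aligned) != len(template_aligned):
--         raise ValueError("Aligned query and template strings must have the same length.")
--     query_pos = []
--     i = query_start - 1
--     for c in query_aligned:
--         if c != "-":
--             query_pos.append(i)
--             i += 1
--         else:
--             query_pos.append(None)
--     template_pos = []
--     j = template_start - 1
--     for c in template_aligned: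
--         if c != "-":
--             template_pos.append(j)
--             j += 1
--         else:
--             template_pos.append(None)
--     return [(q, t) for q, t in zip(query_pos, template_pos)
--             if q is not None and t is not None]
-- ===== Notes on version B (the rewrite author's own statement) =====
-- stated objective: alternative
-- what changed: B splits the single interleaved counting-and-selection loop into two phases: first it maps each column of each aligned string to its running residue index (or None at gaps), then it filters the zipped column positions to the pairs where both are present.
import Mathlib
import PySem

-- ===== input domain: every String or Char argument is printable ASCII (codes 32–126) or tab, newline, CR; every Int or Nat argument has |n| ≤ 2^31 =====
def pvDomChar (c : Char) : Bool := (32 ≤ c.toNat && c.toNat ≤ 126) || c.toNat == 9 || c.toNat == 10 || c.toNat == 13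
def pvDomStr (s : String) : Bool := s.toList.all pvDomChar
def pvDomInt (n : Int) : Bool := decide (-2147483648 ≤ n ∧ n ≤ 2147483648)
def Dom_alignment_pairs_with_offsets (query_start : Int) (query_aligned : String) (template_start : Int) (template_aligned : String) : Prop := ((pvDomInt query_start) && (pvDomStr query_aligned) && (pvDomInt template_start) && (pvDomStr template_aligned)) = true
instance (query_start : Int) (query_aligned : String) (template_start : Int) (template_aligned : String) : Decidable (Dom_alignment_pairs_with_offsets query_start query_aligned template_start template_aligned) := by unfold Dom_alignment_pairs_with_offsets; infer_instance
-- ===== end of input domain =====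

-- ===== PORT A =====
-- B re-implements A by a different decomposition (two position-mapping passes + a filter) of the same O(n) task.
-- Python A raises ValueError on aligned strings of different lengths; Pre_ excludes exactly those inputs.
def alignment_pairs_with_offsets (query_start : Int) (query_aligned : String) (template_start : Int) (template_aligned : String) : List (Int × Int) :=
  -- for query_char, template_char in zip(...): conditional append then conditional increments, as a foldl
  (((query_aligned.toList.zip template_aligned.toList).foldl
    (fun (st : List (Int × Int) × Int × Int) p =>
      let qh := p.1 != '-'
      let th := p.2 != '-'
      let pairs := if qh && th then st.1 ++ [(st.2.1, st.2.2)] else st.1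
      let qi := if qh then st.2.1 + 1 else st.2.1
      let ti := if th then st.2.2 + 1 else st.2.2
      (pairs, qi, ti))
    ([], query_start - 1, template_start - 1))).1

-- ===== PORT B =====
-- phase 1 of Source B: running index at each non-gap column, none at gaps
def pvPositions (i : Int) (cs : List Char) : List (Option Int) :=
  match cs with
  | [] => []
  | c :: rest => if c != '-' then some i :: pvPositions (i + 1) rest else none :: pvPositions i rest

def alignment_pairs_with_offsets_alt (query_start : Int) (query_aligned : String) (template_start : Int) (template_aligned : String) : List (Int × Int) :=
  let query_pos := pvPositions (query_start - 1) query_aligned.toList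
  let template_pos := pvPositions (template_start - 1) template_aligned.toList
  -- phase 2 of Source B: the list comprehension over zip, keeping columns where both are present
  (query_pos.zip template_pos).filterMap
    (fun p => match p.1, p.2 with
      | some q, some t => some (q, t)
      | _, _ => none)

-- ===== PRECONDITION & SPEC =====
-- Pre_ excludes exactly the inputs on which Python A raises ValueError (aligned strings of different lengths).
def Pre_alignment_pairs_with_offsets (query_start : Int) (query_aligned : String) (template_start : Int) (template_aligned : String) : Prop :=
  query_aligned.toList.length = template_aligned.toList.length
instance (query_start : Int) (query_aligned : String) (template_start : Int) (template_aligned : String) : Decidable (Pre_alignment_pairs_with_offsets query_start query_aligned template_start template_aligned) := by unfold Pre_alignment_pairs_with_offsets; infer_instance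

def pvWitness_alignment_pairs_with_offsets : Int × String × Int × String := (7, "AB-C", -2, "A--C")

def Spec_alignment_pairs_with_offsets (query_start : Int) (query_aligned : String) (template_start : Int) (template_aligned : String) (out : List (Int × Int)) : Prop := out = alignment_pairs_with_offsets_alt query_start query_aligned template_start template_aligned
instance (query_start : Int) (query_aligned : String) (template_start : Int) (template_aligned : String) (out : List (Int × Int)) : Decidable (Spec_alignment_pairs_with_offsets query_start query_aligned template_start template_aligned out) := by unfold Spec_alignment_pairs_with_offsets; infer_instance

-- ===== CLAIM (what is proved, stated in full; the proofs are below) =====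
def Claim_equal_alignment_pairs_with_offsets : Prop := ∀ (query_start : Int) (query_aligned : String) (template_start : Int) (template_aligned : String), Dom_alignment_pairs_with_offsets query_start query_aligned template_start template_aligned → Pre_alignment_pairs_with_offsets query_start query_aligned template_start template_aligned → Spec_alignment_pairs_with_offsets query_start query_aligned template_start template_aligned (alignment_pairs_with_offsets query_start query_aligned template_start template_aligned)

-- ===== LEMMAS AND PROOFS =====

-- loop invariant: A's fold over the zipped columns, started from any accumulator and indices,
-- appends exactly the pairs B selects from the two position maps (equal-length lists).
theorem pvFold_eq (xs ys : List Char) (h : xs.length = ys.length)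
    (acc : List (Int × Int)) (qi ti : Int) :
    ((xs.zip ys).foldl
      (fun (st : List (Int × Int) × Int × Int) p =>
        let qh := p.1 != '-'
        let th := p.2 != '-'
        let pairs := if qh && th then st.1 ++ [(st.2.1, st.2.2)] else st.1
        let qi := if qh then st.2.1 + 1 else st.2.1
        let ti := if th then st.2.2 + 1 else st.2.2
        (pairs, qi, ti))
      (acc, qi, ti)).1
    = acc ++ ((pvPositions qi xs).zip (pvPositions ti ys)).filterMap
        (fun p => match p.1, p.2 with
          | some q, some t => some (q, t)
          | _, _ => none) := by
  induction xs generalizing ys acc qi ti with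
  | nil =>
    cases ys with
    | nil => simp [pvPositions]
    | cons y ys => simp at h
  | cons x xs ih =>
    cases ys with
    | nil => simp at h
    | cons y ys =>
      simp only [List.length_cons, Nat.add_right_cancel_iff] at h
      simp only [List.zip_cons_cons, List.foldl_cons]
      rw [ih]
      · by_cases hx : x = '-' <;> by_cases hy : y = '-' <;>
          simp [pvPositions, hx, hy]
      · exact h

-- ===== VERDICT (by name: the statement is the Claim_ definition above) =====
theorem alignment_pairs_with_offsets_spec : Claim_equal_alignment_pairs_with_offsets := by
  intro qs qa ts ta _ hpre
  unfold Spec_alignment_pairs_with_offsets alignment_pairs_with_offsets alignment_pairs_with_offsets_alt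
  simpa using pvFold_eq qa.toList ta.toList hpre [] (qs - 1) (ts - 1)
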